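-- pv_equiv track=rewrite | github.com/lunchboxfortwo/chode | bots/gto.py | _map_action_sequence
-- ===== SOURCE A (Python) =====
-- def _map_action_sequence(seq: list[str]) -> list[str]:
--     """Map game engine action labels to NN action history tokens.
--
--     Engine uses: 'fold', 'call', 'check', 'raise', 'bet', 'allin'
--     NN uses: 'fold', 'call', 'bet', 'squeeze', 'allin'
--     """
--     result = []
--     for a in seq:
--         a_low = a.lower()
--         if a_low in ("fold", "call", "allin"):
--             result.append(a_low)
--         elif a_low in ("raise", "bet"):
--             # Distinguish bet vs squeeze: 3rd+ aggressive action = squeeze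
--             n_agg = sum(1 for x in result if x in ("bet", "squeeze", "allin"))
--             if n_agg >= 2:
--                 result.append("squeeze")
--             else:
--                 result.append("bet")
--         elif a_low == "check":
--             result.append("call")  # check ≈ call-0
--         else:
--             result.append("call")
--     return result
-- ===== SOURCE B (Python) =====
-- def _map_action_sequence(seq: list[str]) -> list[str]:
--     """Two-pass version: first precompute, for each position, the number of
--     aggressive input actions ('raise'/'bet'/'allin', case-insensitive) strictly
--     before it; then map each action using that table."""
--     AGG = ("raise", "bet", "allin")
--     counts = []
--     c = 0
--     for a in seq:
--         counts.append(c)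
--         if a.lower() in AGG:
--             c += 1
--     out = []
--     for a, c in zip(seq, counts):
--         al = a.lower()
--         if al in ("fold", "call", "allin"):
--             out.append(al)
--         elif al in ("raise", "bet"):
--             out.append("squeeze" if c >= 2 else "bet")
--         else:
--             out.append("call")
--     return out
-- ===== Notes on version B (the rewrite author's own statement) =====
-- stated objective: alternative
-- what changed: Replaces the single loop that rescans the growing output list on each aggressive action with two passes: one builds a prefix table of aggressive-input counts, the other emits tokens from it.
import Mathlib
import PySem

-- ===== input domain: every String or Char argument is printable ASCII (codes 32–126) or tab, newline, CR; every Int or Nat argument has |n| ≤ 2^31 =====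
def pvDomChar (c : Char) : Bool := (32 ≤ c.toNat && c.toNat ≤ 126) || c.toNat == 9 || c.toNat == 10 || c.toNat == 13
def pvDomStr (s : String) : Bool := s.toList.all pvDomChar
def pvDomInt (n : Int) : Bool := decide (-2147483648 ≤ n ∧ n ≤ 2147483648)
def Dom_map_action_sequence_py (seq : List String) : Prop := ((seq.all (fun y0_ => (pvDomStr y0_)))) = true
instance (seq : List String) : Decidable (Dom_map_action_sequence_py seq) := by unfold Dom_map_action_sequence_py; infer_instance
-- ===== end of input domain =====

-- B replaces A's per-aggressive-action rescan of the output list with a first pass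
-- building a prefix table of aggressive-input counts and a second pass emitting tokens.

-- ===== PORT A =====
-- predicate of A's inner generator: x in ("bet", "squeeze", "allin")
def pvAggP (x : String) : Bool := x == "bet" || x == "squeeze" || x == "allin"

-- one iteration of A's loop over seq, accumulating `result`
def pvStepA (result : List String) (a : String) : List String :=
  let a_low := PySem.Str.lower a
  if a_low == "fold" || a_low == "call" || a_low == "allin" then
    result ++ [a_low]
  else if a_low == "raise" || a_low == "bet" then
    let n_agg := List.countP pvAggP result
    if 2 ≤ n_agg then result ++ ["squeeze"] else result ++ ["bet"]
  else if a_low == "check" then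
    result ++ ["call"]
  else
    result ++ ["call"]

def map_action_sequence_py (seq : List String) : List String :=
  List.foldl pvStepA [] seq

-- ===== PORT B =====
-- a.lower() in ("raise", "bet", "allin")
def pvAggIn (a : String) : Bool :=
  let al := PySem.Str.lower a
  al == "raise" || al == "bet" || al == "allin"

-- first pass: build counts (prefix aggressive counts), carrying the running count
def pvCountsStep (st : List Nat × Nat) (a : String) : List Nat × Nat :=
  (st.1 ++ [st.2], if pvAggIn a then st.2 + 1 else st.2)

-- body of the second pass
def pvEmit (a : String) (c : Nat) : String :=
  let al := PySem.Str.lower a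
  if al == "fold" || al == "call" || al == "allin" then al
  else if al == "raise" || al == "bet" then (if 2 ≤ c then "squeeze" else "bet")
  else "call"

def map_action_sequence_py_alt (seq : List String) : List String :=
  let counts := (List.foldl pvCountsStep ([], 0) seq).1
  List.zipWith pvEmit seq counts

-- ===== PRECONDITION & SPEC =====
def Spec_map_action_sequence_py (seq : List String) (out : List String) : Prop := out = map_action_sequence_py_alt seq
instance (seq : List String) (out : List String) : Decidable (Spec_map_action_sequence_py seq out) := by unfold Spec_map_action_sequence_py; infer_instance

-- ===== CLAIM (what is proved, stated in full; the proofs are below) =====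
def Claim_equal_map_action_sequence_py : Prop := ∀ (seq : List String), Dom_map_action_sequence_py seq → Spec_map_action_sequence_py seq (map_action_sequence_py seq)

-- ===== LEMMAS AND PROOFS =====

-- reference emission: emit each token, threading the running aggressive count
def pvEmitAll (seq : List String) (c : Nat) : List String :=
  match seq with
  | [] => []
  | a :: r => pvEmit a c :: pvEmitAll r (if pvAggIn a then c + 1 else c)

-- prefix-count list starting from c
def pvPC (seq : List String) (c : Nat) : List Nat :=
  match seq with
  | [] => []
  | a :: r => c :: pvPC r (if pvAggIn a then c + 1 else c)

theorem pvCounts_fold (seq : List String) :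
    ∀ (l : List Nat) (c : Nat),
      (List.foldl pvCountsStep (l, c) seq).1 = l ++ pvPC seq c := by
  induction seq with
  | nil => intro l c; simp [pvPC]
  | cons a r ih =>
      intro l c
      simp only [List.foldl_cons, pvCountsStep, pvPC]
      rw [ih]
      simp

theorem pvZip_pc (seq : List String) :
    ∀ c : Nat, List.zipWith pvEmit seq (pvPC seq c) = pvEmitAll seq c := by
  induction seq with
  | nil => intro c; rfl
  | cons a r ih =>
      intro c
      simp only [pvPC, pvEmitAll, List.zipWith_cons_cons, ih]

theorem pvAlt_eq (seq : List String) :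
    map_action_sequence_py_alt seq = pvEmitAll seq 0 := by
  unfold map_action_sequence_py_alt
  rw [pvCounts_fold seq [] 0]
  simpa using pvZip_pc seq 0

-- aggressiveness of the emitted token equals aggressiveness of the input token
theorem pvAggP_emit (a : String) (c : Nat) : pvAggP (pvEmit a c) = pvAggIn a := by
  simp only [pvEmit, pvAggIn, pvAggP]
  generalize PySem.Str.lower a = al
  split_ifs with h1 h2 h3
  · simp only [Bool.or_eq_true, beq_iff_eq] at h1
    rcases h1 with (h | h) | h <;> subst h <;> decide
  · simp only [Bool.or_eq_true, beq_iff_eq] at h2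
    rcases h2 with h | h <;> subst h <;> decide
  · simp only [Bool.or_eq_true, beq_iff_eq] at h2
    rcases h2 with h | h <;> subst h <;> decide
  · simp only [Bool.or_eq_true, beq_iff_eq, not_or] at h1 h2
    simp [h1.2, h2.1, h2.2]

-- one A-step appends exactly the emitted token for the current count
theorem pvStepA_eq (acc : List String) (a : String) :
    pvStepA acc a = acc ++ [pvEmit a (List.countP pvAggP acc)] := by
  simp only [pvStepA, pvEmit]
  split_ifs <;> rfl

theorem pvFoldA_eq (seq : List String) :
    ∀ acc : List String,
      List.foldl pvStepA acc seq = acc ++ pvEmitAll seq (List.countP pvAggP acc) := by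
  induction seq with
  | nil => intro acc; simp [pvEmitAll]
  | cons a r ih =>
      intro acc
      simp only [List.foldl_cons, pvEmitAll]
      rw [pvStepA_eq, ih]
      have hc : List.countP pvAggP (acc ++ [pvEmit a (List.countP pvAggP acc)])
          = if pvAggIn a then List.countP pvAggP acc + 1 else List.countP pvAggP acc := by
        simp only [List.countP_append, List.countP_cons, List.countP_nil, pvAggP_emit]
        by_cases h : pvAggIn a = true <;> simp [h]
      rw [hc]
      simp

-- ===== VERDICT (by name: the statement is the Claim_ definition above) =====
theorem map_action_sequence_py_spec : Claim_equal_map_action_sequence_py := by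
  intro seq _
  unfold Spec_map_action_sequence_py map_action_sequence_py
  rw [pvFoldA_eq seq [], pvAlt_eq]
  simp
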